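-- pv_equiv track=rewrite | github.com/Global19-atlassian-net/pbalign | pbalign/alignservice/blasr.py | __parseAlgorithmOptionItems
-- ===== SOURCE A (Python) =====
-- def __parseAlgorithmOptionItems(optionstr):
--     """Given a string of algorithm options, reconstruct option items.
--     First, split the string by white space, then reconstruct path with
--     white spaces.
--     """
--     items = optionstr.split(' ')
--     ret = []
--     for index, item in enumerate(items):
--         if item.endswith('\\'):
--             item =  '{x} '.format(x=item)
--         if index > 0 and items[index-1].endswith('\\'):
--             ret[-1] = "{x}{y}".format(x=ret[-1], y=item)
--         else:
--             ret.append(item)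
--     return ret
-- ===== SOURCE B (Python) =====
-- import re
--
-- def __parseAlgorithmOptionItems(optionstr):
--     """Reconstruct option items: split at every space that is not
--     escaped by an immediately preceding backslash (one regex pass)."""
--     return re.split(r'(?<!\\) ', optionstr)
-- ===== Notes on version B (the rewrite author's own statement) =====
-- stated objective: idiomatic
-- what changed: Replaces the split-then-re-merge loop (enumerate with a previous-token lookback and ret[-1] mutation) by a single regex split at every space not preceded by a backslash.
-- intended difference: On strings ending in a backslash A appends a phantom space to the last item (e.g. 'x\\' -> ['x\\ ']) because its escape-space is added unconditionally even with no following token; B returns the item as written ('x\\'), which is the intended reconstruction since that space never occurred in the input. — e.g. on __parseAlgorithmOptionItems("x\\"): A returns ["x\\ "], B returns ["x\\"]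
import Mathlib
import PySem

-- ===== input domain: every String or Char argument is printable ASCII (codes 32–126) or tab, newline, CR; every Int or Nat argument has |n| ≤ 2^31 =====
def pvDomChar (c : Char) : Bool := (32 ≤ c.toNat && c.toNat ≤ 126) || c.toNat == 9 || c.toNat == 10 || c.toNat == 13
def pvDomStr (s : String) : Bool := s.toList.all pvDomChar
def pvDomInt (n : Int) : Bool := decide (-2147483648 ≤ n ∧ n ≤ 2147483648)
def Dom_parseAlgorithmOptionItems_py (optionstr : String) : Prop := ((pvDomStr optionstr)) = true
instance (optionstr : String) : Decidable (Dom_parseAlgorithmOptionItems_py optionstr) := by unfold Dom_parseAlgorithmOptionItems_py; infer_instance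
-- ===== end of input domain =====

-- B replaces A's split-then-re-merge enumerate loop by one regex split at every space
-- not preceded by a backslash; on strings ending in '\' A returns a phantom trailing
-- space and B the item as written (see D_ below).

-- ===== PORT A =====
-- literal port of __parseAlgorithmOptionItems: items = optionstr.split(' '),
-- then an enumerate loop with a lookback at items[index-1] and ret[-1] mutation.
def parseAlgorithmOptionItems_py (optionstr : String) : List String :=
  let items := (PySem.Str.split? optionstr " ").getD []  -- sep " " ≠ "" so split? is always `some`
  (PySem.List.enumerate items).foldl
    (fun ret p =>
      let index := p.1
      let item := p.2
      let item := if PySem.Str.endswith item "\\" then item ++ " " else item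
      if index > 0 ∧ PySem.Str.endswith (PySem.List.pyGetD items (index - 1) "") "\\" then
        -- ret[-1] = ret[-1] + item  (ret is nonempty whenever this branch runs)
        ret.dropLast ++ [ret.getLastD "" ++ item]
      else
        ret ++ [item]) []

-- ===== PORT B =====
-- hand port of re.split(r'(?<!\\) ', optionstr): exact for this pattern, because the
-- lookbehind inspects one character — a space is a split point iff the accumulated
-- chunk does not end in '\' (after a split the preceding character was a space).
def pvAltGo (acc : List (List Char)) (cur : List Char) : List Char → List (List Char)
  | [] => acc ++ [cur]
  | c :: rest =>
      if c = ' ' ∧ PySem.Chars.endswith cur ['\\'] = false then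
        pvAltGo (acc ++ [cur]) [] rest
      else
        pvAltGo acc (cur ++ [c]) rest

def parseAlgorithmOptionItems_py_alt (optionstr : String) : List String :=
  (pvAltGo [] [] optionstr.toList).map String.ofList

-- ===== PRECONDITION & SPEC =====
-- On strings ending in a backslash, A appends a phantom space to the last item
-- ('x\' -> ['x\ ']) because its escape-space is added even with no following token;
-- B returns the item as written ('x\'), the intended reconstruction since that
-- space never occurred in the input.
def D_parseAlgorithmOptionItems_py (optionstr : String) : Prop :=
  PySem.Str.endswith optionstr "\\" = true
instance (optionstr : String) : Decidable (D_parseAlgorithmOptionItems_py optionstr) := by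
  unfold D_parseAlgorithmOptionItems_py; infer_instance

def Spec_parseAlgorithmOptionItems_py (optionstr : String) (out : List String) : Prop :=
  ¬ D_parseAlgorithmOptionItems_py optionstr → out = parseAlgorithmOptionItems_py_alt optionstr
instance (optionstr : String) (out : List String) : Decidable (Spec_parseAlgorithmOptionItems_py optionstr out) := by
  unfold Spec_parseAlgorithmOptionItems_py; infer_instance

def pvDiffWitness_parseAlgorithmOptionItems_py : String := "x\\"
def pvDiffWitnessOut_parseAlgorithmOptionItems_py : (List String) × (List String) :=
  (["x\\ "], ["x\\"])

-- ===== CLAIM (what is proved, stated in full; the proofs are below) =====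
def Claim_unchanged_parseAlgorithmOptionItems_py : Prop := ∀ (optionstr : String), Dom_parseAlgorithmOptionItems_py optionstr → Spec_parseAlgorithmOptionItems_py optionstr (parseAlgorithmOptionItems_py optionstr)
def Claim_changed_parseAlgorithmOptionItems_py : Prop := Dom_parseAlgorithmOptionItems_py (pvDiffWitness_parseAlgorithmOptionItems_py) ∧ D_parseAlgorithmOptionItems_py (pvDiffWitness_parseAlgorithmOptionItems_py) ∧ parseAlgorithmOptionItems_py (pvDiffWitness_parseAlgorithmOptionItems_py) = pvDiffWitnessOut_parseAlgorithmOptionItems_py.1 ∧ parseAlgorithmOptionItems_py_alt (pvDiffWitness_parseAlgorithmOptionItems_py) = pvDiffWitnessOut_parseAlgorithmOptionItems_py.2 ∧ pvDiffWitnessOut_parseAlgorithmOptionItems_py.1 ≠ pvDiffWitnessOut_parseAlgorithmOptionItems_py.2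
def Claim_exact_parseAlgorithmOptionItems_py : Prop := ∀ (optionstr : String), Dom_parseAlgorithmOptionItems_py optionstr → D_parseAlgorithmOptionItems_py optionstr → parseAlgorithmOptionItems_py optionstr ≠ parseAlgorithmOptionItems_py_alt optionstr

-- ===== LEMMAS AND PROOFS =====

def pvEnds (l : List Char) : Bool := l.getLast? == some '\\'
def pvSplitSp : List Char → List (List Char)
  | [] => [[]]
  | c :: r =>
      if c = ' ' then [] :: pvSplitSp r
      else
        match pvSplitSp r with
        | [] => [[c]]
        | h :: t => (c :: h) :: t
def pvConsHead (x : List Char) : List (List Char) → List (List Char)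
  | [] => [x]
  | h :: t => (x ++ h) :: t

theorem pvSplitSp_ne_nil (cs : List Char) : pvSplitSp cs ≠ [] := by
  match cs with
  | [] => simp [pvSplitSp]
  | c :: r =>
    simp only [pvSplitSp]
    split
    · simp
    · split <;> simp

theorem pvSplit_go (l : List Char) : ∀ (fuel : Nat) (cur : List Char) (acc : List (List Char)),
    l.length + 1 ≤ fuel →
    PySem.Chars.splitOn.go [' '] fuel l cur acc = acc.reverse ++ pvConsHead cur.reverse (pvSplitSp l) := by
  induction l with
  | nil =>
    intro fuel cur acc h
    obtain ⟨f, rfl⟩ : ∃ f, fuel = f + 1 := ⟨fuel - 1, by omega⟩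
    simp [PySem.Chars.splitOn.go, pvSplitSp, pvConsHead]
  | cons c rest ih =>
    intro fuel cur acc h
    obtain ⟨f, rfl⟩ : ∃ f, fuel = f + 1 := ⟨fuel - 1, by omega⟩
    rw [PySem.Chars.splitOn.go]
    by_cases hc : c = ' '
    · subst hc
      have hpre : [' '].isPrefixOf (' ' :: rest) = true := by simp [List.isPrefixOf]
      simp only [hpre, if_pos, List.length_cons, List.length_nil, List.drop_succ_cons, List.drop_zero]
      rw [ih f [] (cur.reverse :: acc) (by simp at h ⊢; omega)]
      simp only [pvSplitSp, if_pos, List.reverse_cons, List.reverse_nil, List.nil_append, pvConsHead, List.append_assoc, List.singleton_append]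
      cases hsp : pvSplitSp rest
      · exact absurd hsp (pvSplitSp_ne_nil rest)
      · simp
    · have hpre : [' '].isPrefixOf (c :: rest) = false := by
        simp [List.isPrefixOf]; exact fun hh => (hc hh.symm).elim
      simp only [hpre, Bool.false_eq_true, if_false]
      rw [ih f (c :: cur) acc (by simp at h ⊢; omega)]
      simp only [pvSplitSp, hc, if_false, List.reverse_cons]
      rcases hsp : pvSplitSp rest with _ | ⟨hh, tt⟩
      · exact absurd hsp (pvSplitSp_ne_nil rest)
      · simp [pvConsHead]

theorem pvSplit_eq (cs : List Char) : PySem.Chars.splitOn cs [' '] = pvSplitSp cs := by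
  rw [PySem.Chars.splitOn, pvSplit_go cs (cs.length + 1) [] [] (le_refl _)]
  rcases hsp : pvSplitSp cs with _ | ⟨h, t⟩
  · exact absurd hsp (pvSplitSp_ne_nil cs)
  · simp [pvConsHead]

theorem pvEndswith_eq (l : List Char) : PySem.Chars.endswith l ['\\'] = pvEnds l := by
  rw [PySem.Chars.endswith, pvEnds]
  rcases h : l.getLast? with _ | a
  · have : l = [] := by cases l using List.reverseRecOn <;> simp_all
    subst this; simp [List.isSuffixOf]
  · obtain ⟨l', rfl⟩ := List.getLast?_eq_some_iff.mp h
    rw [List.getLast?_concat] at h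
    by_cases ha : a = '\\'
    · subst ha
      have h1 : ['\\'].isSuffixOf (l' ++ ['\\']) = true :=
        List.isSuffixOf_iff_suffix.mpr ⟨l', rfl⟩
      rw [h1]; simp
    · have hns : ¬ ['\\'] <:+ (l' ++ [a]) := by
        rintro ⟨t, ht⟩
        have := congrArg List.getLast? ht
        rw [List.getLast?_concat, List.getLast?_concat] at this
        injection this with this
        exact ha this.symm
      have h1 : ['\\'].isSuffixOf (l' ++ [a]) = false := by
        rw [Bool.eq_false_iff]
        intro hc
        exact hns (List.isSuffixOf_iff_suffix.mp hc)
      rw [h1]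
      simp [ha]

theorem pvEnds_append_sp (x h : List Char) : pvEnds (x ++ ' ' :: h) = pvEnds h := by
  rcases h.eq_nil_or_concat with rfl | ⟨h', a, rfl⟩
  · simp [pvEnds]
  · simp only [pvEnds, List.concat_eq_append]
    rw [show x ++ ' ' :: (h' ++ [a]) = (x ++ ' ' :: h') ++ [a] by simp]
    simp only [List.getLast?_concat]

def pvMerge : List (List Char) → List (List Char)
  | [] => []
  | [t] => if pvEnds t then [t ++ [' ']] else [t]
  | t :: u :: r =>
      if pvEnds t then pvMerge ((t ++ ' ' :: u) :: r)
      else t :: pvMerge (u :: r)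
termination_by l => l.length

def pvMerge' : List (List Char) → List (List Char)
  | [] => []
  | [t] => [t]
  | t :: u :: r =>
      if pvEnds t then pvMerge' ((t ++ ' ' :: u) :: r)
      else t :: pvMerge' (u :: r)
termination_by l => l.length

theorem pvMergeCH (r : List (List Char)) : ∀ (x h : List Char),
    pvMerge ((x ++ ' ' :: h) :: r) = pvConsHead (x ++ [' ']) (pvMerge (h :: r)) := by
  induction r with
  | nil =>
    intro x h
    simp only [pvMerge, pvEnds_append_sp]
    by_cases he : pvEnds h <;> simp [he, pvConsHead]
  | cons u r' ih =>
    intro x h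
    rw [pvMerge, pvMerge]
    simp only [pvEnds_append_sp]
    by_cases he : pvEnds h
    · simp only [he, if_pos]
      rw [show x ++ ' ' :: h ++ ' ' :: u = x ++ ' ' :: (h ++ ' ' :: u) by simp]
      exact ih x (h ++ ' ' :: u)
    · simp [he, pvConsHead]


def pvFoldC : List (List Char) → Bool → List (List Char) → List (List Char)
  | ret, _, [] => ret
  | ret, prevB, t :: ts =>
      let t' := if pvEnds t then t ++ [' '] else t
      if prevB then pvFoldC (ret.dropLast ++ [ret.getLastD [] ++ t']) (pvEnds t) ts
      else pvFoldC (ret ++ [t']) (pvEnds t) ts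

theorem pvFoldC_merge (ts : List (List Char)) :
    (∀ ret, pvFoldC ret false ts = ret ++ pvMerge ts) ∧
    (∀ r0 g, pvFoldC (r0 ++ [g]) true ts = r0 ++ pvConsHead g (pvMerge ts)) := by
  induction ts with
  | nil => exact ⟨fun ret => by simp [pvFoldC, pvMerge],
           fun r0 g => by simp [pvFoldC, pvMerge, pvConsHead]⟩
  | cons t ts' ih =>
    constructor
    · intro ret
      rw [pvFoldC]
      simp only [Bool.false_eq_true, if_false]
      by_cases he : pvEnds t
      · simp only [he, if_pos]
        rw [ih.2 ret (t ++ [' '])]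
        congr 1
        cases ts' with
        | nil => simp [pvMerge, he, pvConsHead]
        | cons u r =>
          rw [pvMerge]
          simp only [he, if_pos]
          rw [pvMergeCH r t u]
      · simp only [he, Bool.false_eq_true, if_false]
        rw [ih.1 (ret ++ [t])]
        cases ts' with
        | nil => simp [pvMerge, he]
        | cons u r => rw [pvMerge]; simp [he]
    · intro r0 g
      rw [pvFoldC]
      simp only [if_pos, List.dropLast_concat, List.getLastD_concat]
      by_cases he : pvEnds t
      · simp only [he, if_pos]
        rw [ih.2 r0 (g ++ (t ++ [' ']))]
        congr 1
        cases ts' with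
        | nil => simp [pvMerge, he, pvConsHead]
        | cons u r =>
          rw [pvMerge]
          simp only [he, if_pos, pvMergeCH]
          cases hm : pvMerge (u :: r) with
          | nil => simp [pvConsHead]
          | cons mh mt => simp [pvConsHead]
      · simp only [he, Bool.false_eq_true, if_false]
        rw [ih.1 (r0 ++ [g ++ t])]
        cases ts' with
        | nil => simp [pvMerge, he, pvConsHead]
        | cons u r => rw [pvMerge]; simp [he, pvConsHead]


theorem pvAltGo_merge (cs : List Char) : ∀ (acc : List (List Char)) (cur : List Char),
    pvAltGo acc cur cs = acc ++ pvMerge' (pvConsHead cur (pvSplitSp cs)) := by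
  induction cs with
  | nil =>
    intro acc cur
    simp [pvAltGo, pvSplitSp, pvConsHead, pvMerge']
  | cons c rest ih =>
    intro acc cur
    rw [pvAltGo, pvEndswith_eq]
    by_cases hc : c = ' '
    · subst hc
      by_cases he : pvEnds cur
      · simp only [he, Bool.true_eq_false, and_false, if_neg, not_false_iff]
        rw [ih acc (cur ++ [' '])]
        simp only [pvSplitSp, if_pos]
        rcases hsp : pvSplitSp rest with _ | ⟨h, t⟩
        · exact absurd hsp (pvSplitSp_ne_nil rest)
        · simp only [pvConsHead]
          conv_rhs => rw [pvMerge']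
          simp only [List.append_nil, he, if_pos, List.append_assoc, List.singleton_append]
      · simp only [he, and_true, if_pos]
        rw [ih (acc ++ [cur]) []]
        simp only [pvSplitSp, if_pos, List.append_assoc]
        rcases hsp : pvSplitSp rest with _ | ⟨h, t⟩
        · exact absurd hsp (pvSplitSp_ne_nil rest)
        · simp only [pvConsHead, List.nil_append]
          conv_rhs => rw [pvMerge']
          simp only [List.append_nil, he, Bool.false_eq_true, if_false]
          simp
    · have : ¬ (c = ' ' ∧ PySem.Chars.endswith cur ['\\'] = false) := fun hh => hc hh.1
      rw [pvEndswith_eq] at this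
      simp only [this, if_neg, not_false_iff]
      rw [ih acc (cur ++ [c])]
      simp only [pvSplitSp, hc, if_false]
      rcases hsp : pvSplitSp rest with _ | ⟨h, t⟩
      · exact absurd hsp (pvSplitSp_ne_nil rest)
      · simp [pvConsHead]

theorem pvSplitSp_singleton_nil (r : List Char) (h : pvSplitSp r = [[]]) : r = [] := by
  cases r with
  | nil => rfl
  | cons c r' =>
    exfalso
    simp only [pvSplitSp] at h
    by_cases hc : c = ' '
    · simp only [hc, if_pos] at h
      exact (pvSplitSp_ne_nil r') (by simpa using h)
    · simp only [hc, if_false] at h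
      rcases hsp : pvSplitSp r' with _ | ⟨hh, tt⟩
      · exact absurd hsp (pvSplitSp_ne_nil r')
      · rw [hsp] at h; simp at h

theorem pvEnds_cons (c : Char) (r : List Char) :
    pvEnds (c :: r) = if r = [] then decide (c = '\\') else pvEnds r := by
  cases r with
  | nil => simp [pvEnds]; rfl
  | cons d r' => simp [pvEnds]

theorem pvLast_split (cs : List Char) : pvEnds ((pvSplitSp cs).getLastD []) = pvEnds cs := by
  induction cs with
  | nil => simp [pvSplitSp, pvEnds]
  | cons c r ih =>
    simp only [pvSplitSp]
    by_cases hc : c = ' '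
    · subst hc
      simp only [if_pos]
      rw [List.getLastD_cons, ih, pvEnds_cons]
      cases r with
      | nil => simp [pvEnds]
      | cons d r' => simp
    · simp only [hc, if_false]
      rcases hsp : pvSplitSp r with _ | ⟨h, t⟩
      · exact absurd hsp (pvSplitSp_ne_nil r)
      · rw [hsp] at ih
        cases t with
        | nil =>
          rw [List.getLastD_cons] at ih ⊢
          simp only [List.getLastD_nil] at ih ⊢
          cases h with
          | nil =>
            have hr : r = [] := pvSplitSp_singleton_nil r hsp
            subst hr
            rfl
          | cons d h' =>
            have hr : r ≠ [] := by
              intro hr; subst hr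
              simp [pvSplitSp] at hsp
            rw [pvEnds_cons c (d :: h'), pvEnds_cons c r]
            simp [hr, ih]
        | cons u t' =>
          have hr : r ≠ [] := by
            intro hr; subst hr
            simp [pvSplitSp] at hsp
          rw [List.getLastD_cons, List.getLastD_cons] at ih ⊢
          rw [ih, pvEnds_cons]
          simp [hr]

theorem pvGetLastD_irrel {α : Type} (l : List α) (h : l ≠ []) (a b : α) :
    l.getLastD a = l.getLastD b := by
  rcases l.eq_nil_or_concat with rfl | ⟨l', x, rfl⟩
  · exact absurd rfl h
  · simp

theorem pvMerge'_ne_nil : ∀ (n : Nat) (l : List (List Char)), l.length ≤ n → l ≠ [] → pvMerge' l ≠ [] := by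
  intro n
  induction n with
  | zero => intro l hl hne; cases l <;> simp_all
  | succ n ih =>
    intro l hl hne
    match l with
    | [] => exact absurd rfl hne
    | [t] => simp [pvMerge']
    | t :: u :: r =>
      rw [pvMerge']
      by_cases he : pvEnds t
      · simp only [he, if_pos]
        exact ih _ (by simp at hl ⊢; omega) (by simp)
      · simp [he]

theorem pvLast_step (t u : List Char) (r : List (List Char)) :
    pvEnds (((t ++ ' ' :: u) :: r).getLastD []) = pvEnds ((t :: u :: r).getLastD []) := by
  cases r with
  | nil => simp [pvEnds_append_sp]
  | cons v r' => simp

theorem pvMergeMM : ∀ (n : Nat) (l : List (List Char)), l.length ≤ n →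
    (pvEnds (l.getLastD []) = false → pvMerge l = pvMerge' l) ∧
    (pvEnds (l.getLastD []) = true →
      pvMerge l = (pvMerge' l).dropLast ++ [(pvMerge' l).getLastD [] ++ [' ']]) := by
  intro n
  induction n with
  | zero =>
    intro l hl
    have : l = [] := by cases l <;> simp_all
    subst this
    constructor
    · intro _; simp [pvMerge, pvMerge']
    · intro h; simp [pvEnds] at h
  | succ n ih =>
    intro l hl
    match l with
    | [] =>
      constructor
      · intro _; simp [pvMerge, pvMerge']
      · intro h; simp [pvEnds] at h
    | [t] =>
      constructor
      · intro h; simp only [List.getLastD_cons, List.getLastD_nil] at h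
        simp [pvMerge, pvMerge', h]
      · intro h; simp only [List.getLastD_cons, List.getLastD_nil] at h
        simp [pvMerge, pvMerge', h]
    | t :: u :: r =>
      have hlen : ((t ++ ' ' :: u) :: r).length ≤ n := by simp at hl ⊢; omega
      have hlen2 : (u :: r).length ≤ n := by simp at hl ⊢; omega
      constructor
      · intro h
        rw [pvMerge, pvMerge']
        by_cases he : pvEnds t
        · simp only [he, if_pos]
          exact (ih _ hlen).1 (by rw [pvLast_step]; exact h)
        · simp only [he, Bool.false_eq_true, if_false]
          congr 1
          exact (ih _ hlen2).1 (by
            rw [List.getLastD_cons] at h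
            rw [pvGetLastD_irrel (u :: r) (by simp) [] t]
            exact h)
      · intro h
        rw [pvMerge, pvMerge']
        by_cases he : pvEnds t
        · simp only [he, if_pos]
          exact (ih _ hlen).2 (by rw [pvLast_step]; exact h)
        · simp only [he, Bool.false_eq_true, if_false]
          have hne : pvMerge' (u :: r) ≠ [] := pvMerge'_ne_nil n _ hlen2 (by simp)
          rw [(ih _ hlen2).2 (by
            rw [List.getLastD_cons] at h
            rw [pvGetLastD_irrel (u :: r) (by simp) [] t]
            exact h)]
          rw [List.dropLast_cons_of_ne_nil hne, List.getLastD_cons,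
              pvGetLastD_irrel _ hne t []]
          simp

theorem pvMapGetD (l : List (List Char)) (n : Nat) :
    (l.map String.ofList).getD n "" = String.ofList (l.getD n []) := by
  rw [List.getD_eq_getElem?_getD, List.getD_eq_getElem?_getD, List.getElem?_map]
  cases l[n]? <;> simp


theorem pvEndswithStr (t : List Char) :
    PySem.Str.endswith (String.ofList t) "\\" = pvEnds t := by
  rw [PySem.Str.endswith]
  have h1 : (String.ofList t).toList = t := by simp
  have h2 : ("\\" : String).toList = ['\\'] := by decide
  rw [h1, h2, pvEndswith_eq]

theorem pvFL (ps : List (List Char)) : ∀ (ts : List (List Char)) (k : Nat) (ret : List (List Char)),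
    ps.drop k = ts →
    (PySem.List.enumerate (ts.map String.ofList) (k : Int)).foldl
      (fun ret p =>
        let index := p.1
        let item := p.2
        let item := if PySem.Str.endswith item "\\" then item ++ " " else item
        if index > 0 ∧ PySem.Str.endswith (PySem.List.pyGetD (ps.map String.ofList) (index - 1) "") "\\" then
          ret.dropLast ++ [ret.getLastD "" ++ item]
        else ret ++ [item]) (ret.map String.ofList)
    = (pvFoldC ret (decide (0 < k) && pvEnds (ps.getD (k-1) [])) ts).map String.ofList := by
  intro ts
  induction ts with
  | nil => intro k ret _; simp [pvFoldC]
  | cons t ts' ih =>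
    intro k ret hdrop
    have hk : k < ps.length := by
      by_contra hge
      rw [List.drop_eq_nil_of_le (by omega)] at hdrop
      exact List.cons_ne_nil _ _ hdrop.symm
    have hget : ps.getD k [] = t := by
      have h1 : ps[k]? = some t := by
        have := congrArg (fun l => l[0]?) hdrop
        simpa [List.getElem?_drop] using this
      rw [List.getD_eq_getElem?_getD, h1]
      rfl
    have hdrop' : ps.drop (k+1) = ts' := by
      have := congrArg List.tail hdrop
      simpa [List.tail_drop] using this
    rw [List.map_cons, PySem.List.enumerate_cons, List.foldl_cons]
    have hstep : (let index := ((k : Int), String.ofList t).1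
        let item := ((k : Int), String.ofList t).2
        let item := if PySem.Str.endswith item "\\" then item ++ " " else item
        if index > 0 ∧ PySem.Str.endswith (PySem.List.pyGetD (List.map String.ofList ps) (index - 1) "") "\\" then
          (List.map String.ofList ret).dropLast ++ [(List.map String.ofList ret).getLastD "" ++ item]
        else List.map String.ofList ret ++ [item])
      = ((if (decide (0 < k) && pvEnds (ps.getD (k-1) [])) = true then
            ret.dropLast ++ [ret.getLastD [] ++ (if pvEnds t then t ++ [' '] else t)]
          else ret ++ [if pvEnds t then t ++ [' '] else t]).map String.ofList) := by
      simp only []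
      simp only [pvEndswithStr]
      by_cases hk0 : 0 < k
      · have hidx : (k : Int) - 1 = ((k - 1 : Nat) : Int) := by omega
        rw [hidx, PySem.List.pyGetD_natCast, pvMapGetD, pvEndswithStr]
        by_cases hE : pvEnds (ps.getD (k-1) []) = true
        · rw [if_pos ⟨by exact_mod_cast hk0, hE⟩]
          simp only [hk0, decide_true, Bool.true_and, hE, if_pos]
          by_cases he : pvEnds t <;> simp [he]
        · rw [if_neg (by intro hc; exact hE hc.2)]
          simp only [hk0, decide_true, Bool.true_and, hE, Bool.false_eq_true, if_false]
          by_cases he : pvEnds t <;> simp [he]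
      · have hk0' : k = 0 := by omega
        subst hk0'
        rw [if_neg (by intro hc; exact absurd hc.1 (by simp))]
        simp only [Nat.lt_irrefl, decide_false, Bool.false_and, Bool.false_eq_true, if_false]
        by_cases he : pvEnds t <;> simp [he]
    rw [hstep]
    have hcast : ((k : Int) + 1) = ((k + 1 : Nat) : Int) := by push_cast; ring
    rw [hcast]
    rw [pvFoldC]
    by_cases hB : (decide (0 < k) && pvEnds (ps.getD (k-1) [])) = true
    · rw [if_pos hB]
      simp only [hB, if_pos]
      rw [ih (k+1) (ret.dropLast ++ [ret.getLastD [] ++ (if pvEnds t then t ++ [' '] else t)]) hdrop']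
      simp only [Nat.add_sub_cancel, hget, Nat.zero_lt_succ, decide_true, Bool.true_and]
    · rw [if_neg hB]
      simp only [hB, Bool.false_eq_true, if_false]
      rw [ih (k+1) (ret ++ [if pvEnds t then t ++ [' '] else t]) hdrop']
      simp only [Nat.add_sub_cancel, hget, Nat.zero_lt_succ, decide_true, Bool.true_and]

theorem pvItems (s : String) :
    (PySem.Str.split? s " ").getD [] = (pvSplitSp s.toList).map String.ofList := by
  rw [PySem.Str.split?]
  have h : (" " : String).toList = [' '] := by decide
  rw [h, PySem.Chars.split?]
  simp [pvSplit_eq]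

theorem pvA_eq (s : String) :
    parseAlgorithmOptionItems_py s
      = (pvFoldC [] false (pvSplitSp s.toList)).map String.ofList := by
  simp only [parseAlgorithmOptionItems_py]
  rw [pvItems]
  have h := pvFL (pvSplitSp s.toList) (pvSplitSp s.toList) 0 [] (by simp)
  simpa using h

theorem pvB_eq (s : String) :
    parseAlgorithmOptionItems_py_alt s
      = (pvMerge' (pvSplitSp s.toList)).map String.ofList := by
  simp only [parseAlgorithmOptionItems_py_alt]
  rw [pvAltGo_merge]
  rcases hsp : pvSplitSp s.toList with _ | ⟨h, t⟩
  · exact absurd hsp (pvSplitSp_ne_nil _)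
  · simp [pvConsHead]

theorem pvDEnds (s : String) : PySem.Str.endswith s "\\" = pvEnds s.toList := by
  rw [PySem.Str.endswith]
  have h : ("\\" : String).toList = ['\\'] := by decide
  rw [h, pvEndswith_eq]

theorem pvFinal (s : String) (h : pvEnds s.toList = false) :
    parseAlgorithmOptionItems_py s = parseAlgorithmOptionItems_py_alt s := by
  rw [pvA_eq, pvB_eq]
  congr 1
  have h1 := (pvFoldC_merge (pvSplitSp s.toList)).1 []
  rw [List.nil_append] at h1
  rw [h1]
  exact (pvMergeMM (pvSplitSp s.toList).length _ le_rfl).1 (by rw [pvLast_split]; exact h)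

theorem pvFinalNe (s : String) (h : pvEnds s.toList = true) :
    parseAlgorithmOptionItems_py s ≠ parseAlgorithmOptionItems_py_alt s := by
  rw [pvA_eq, pvB_eq]
  intro heq
  have hinj : Function.Injective String.ofList := by
    intro a b hab
    have := congrArg String.toList hab
    simpa using this
  have heq2 : pvFoldC [] false (pvSplitSp s.toList) = pvMerge' (pvSplitSp s.toList) :=
    List.map_injective_iff.mpr hinj heq
  have h1 := (pvFoldC_merge (pvSplitSp s.toList)).1 []
  rw [List.nil_append] at h1
  rw [h1] at heq2
  have h2 := (pvMergeMM (pvSplitSp s.toList).length _ le_rfl).2 (by rw [pvLast_split]; exact h)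
  rw [heq2] at h2
  have hne : pvMerge' (pvSplitSp s.toList) ≠ [] :=
    pvMerge'_ne_nil _ _ le_rfl (pvSplitSp_ne_nil _)
  rcases (pvMerge' (pvSplitSp s.toList)).eq_nil_or_concat with hnil | ⟨l', x, hcat⟩
  · exact hne hnil
  · rw [hcat] at h2
    simp only [List.concat_eq_append, List.dropLast_concat, List.getLastD_concat] at h2
    have hx : x = x ++ [' '] := by
      have h3 := List.append_inj_right h2 rfl
      injection h3
    have hlen := congrArg List.length hx
    simp at hlen

-- ===== VERDICT (by name: the statement is the Claim_ definition above) =====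
theorem parseAlgorithmOptionItems_py_spec : Claim_unchanged_parseAlgorithmOptionItems_py := by
  intro s _ hD
  apply pvFinal
  rw [← pvDEnds]
  exact Bool.not_eq_true _ ▸ (by simpa [D_parseAlgorithmOptionItems_py] using hD)

theorem parseAlgorithmOptionItems_py_changed : Claim_changed_parseAlgorithmOptionItems_py := by
  unfold Claim_changed_parseAlgorithmOptionItems_py; decide

theorem parseAlgorithmOptionItems_py_tight : Claim_exact_parseAlgorithmOptionItems_py := by
  intro s _ hD
  apply pvFinalNe
  rw [← pvDEnds]
  exact hD
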